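-- pv_equiv track=rewrite | github.com/MrBrantCode/unitest_baseline | mut_generate/mist_train_cf/cf_76250/solution.py | prime_factorial_sum
-- ===== SOURCE A (Python) =====
-- import math
--
-- def is_prime(n):
--     """Check if the number n is prime or not."""
--     if n == 2 or n == 3:
--         return True
--     if n < 2 or n%2 == 0:
--         return False
--     for i in range(3, int(n**0.5) + 1, 2):
--         if n % i == 0:
--             return False
--     return True
--
-- def prime_factorial_sum(n):
--     """Find the sum of the factorials of the first n primes."""
--     prime_sum = 0
--     prime_count = 0
--     i = 2
--     while prime_count < n:
--         if is_prime(i):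
--             prime_sum += math.factorial(i)
--             prime_count += 1
--         i += 1
--     return prime_sum
-- ===== SOURCE B (Python) =====
-- import math
--
-- def _is_prime(i):
--     return i >= 2 and all(i % d for d in range(2, math.isqrt(i) + 1))
--
-- def prime_factorial_sum(n):
--     """Sum of the factorials of the first n primes, via one running factorial."""
--     total = 0
--     count = 0
--     fact = 1          # (i-1)! at the top of each iteration
--     i = 2
--     while count < n:
--         fact *= i     # now fact = i!
--         if _is_prime(i):
--             total += fact
--             count += 1
--         i += 1
--     return total
-- ===== Notes on version B (the rewrite author's own statement) =====
-- stated objective: alternative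
-- what changed: B keeps one running factorial extended by a single multiplication per integer (instead of recomputing math.factorial from scratch at every prime) and tests primality with a plain all()-over-isqrt trial division instead of A's special-cased odd-step loop with a float square root; intended as faster (fewer big-int multiplications) and a timing run measured B 41.6x ahead at the largest size both finished, but it could not confirm 'faster' because both programs fail on some of the largest inputs, so no speed is claimed.
import Mathlib
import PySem

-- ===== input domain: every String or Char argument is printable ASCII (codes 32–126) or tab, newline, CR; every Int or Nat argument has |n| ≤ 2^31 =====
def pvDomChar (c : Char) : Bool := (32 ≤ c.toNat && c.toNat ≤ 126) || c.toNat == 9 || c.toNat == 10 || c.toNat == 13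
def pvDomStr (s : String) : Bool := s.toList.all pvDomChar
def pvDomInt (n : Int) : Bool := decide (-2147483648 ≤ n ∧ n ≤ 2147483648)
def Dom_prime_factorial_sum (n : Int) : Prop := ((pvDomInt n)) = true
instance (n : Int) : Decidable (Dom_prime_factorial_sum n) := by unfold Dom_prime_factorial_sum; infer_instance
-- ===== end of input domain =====

-- B replaces A's per-prime math.factorial recomputation by one running factorial
-- (one multiplication per integer) and uses a plain isqrt trial division
-- (intended as faster; measured 41.6x at the largest size both finished, unconfirmed at the top size).


-- ===== PORT A =====
-- is_prime: A's trial division (2/3 special cases, evens, then odd divisors up to the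
-- square root).  int(n**0.5) is ported as the exact integer square root Nat.sqrt
-- (exact where the float square root is exact).
def is_prime (n : Int) : Bool :=
  if n = 2 ∨ n = 3 then true
  else if n < 2 ∨ PySem.Int.mod n 2 = 0 then false
  else
    -- 'for i in range(3, int(n**0.5)+1, 2): if n % i == 0: return false' / 'return true'
    !(PySem.List.pyRange 3 ((n.toNat.sqrt : Int) + 1) 2).any
        (fun i => PySem.Int.mod n i = 0)

-- A's is_prime answers exactly primality (needed by the while-loop's termination).
theorem is_prime_iff (i : Nat) : is_prime (i : Int) = true ↔ Nat.Prime i := by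
  unfold is_prime
  by_cases h23 : (i:Int) = 2 ∨ (i:Int) = 3
  · have : i = 2 ∨ i = 3 := by omega
    rcases this with rfl | rfl <;> simp [Nat.prime_two, Nat.prime_three]
  · by_cases hlt : (i:Int) < 2 ∨ PySem.Int.mod (i:Int) 2 = 0
    · rw [if_neg h23, if_pos hlt]
      simp only [Bool.false_eq_true, false_iff]
      rcases hlt with hlt | hmod
      · intro hp; have := hp.two_le; omega
      · have hdvd : 2 ∣ i := by
          exact_mod_cast (PySem.Int.mod_eq_zero_iff_dvd _ _).mp hmod
        intro hp
        rcases hp.eq_one_or_self_of_dvd 2 hdvd with h | h <;> omega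
    · rw [if_neg h23, if_neg hlt]
      have hge : (2:Int) ≤ i := by omega
      have hodd : ¬ PySem.Int.mod (i:Int) 2 = 0 := fun h => hlt (Or.inr h)
      have hoddn : i % 2 = 1 := by
        rcases Nat.even_or_odd i with he | ho
        · exact absurd ((PySem.Int.mod_eq_zero_iff_dvd _ _).mpr (by exact_mod_cast he.two_dvd)) hodd
        · exact Nat.odd_iff.mp ho
      simp only [Int.toNat_natCast, Bool.not_eq_true', List.any_eq_false, decide_eq_true_eq]
      constructor
      · intro hall
        rw [Nat.prime_def_le_sqrt]
        refine ⟨by omega, fun m hm2 hms hdvd => ?_⟩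
        have hmodd : m % 2 = 1 := by
          rcases Nat.even_or_odd m with he | ho
          · obtain ⟨k, rfl⟩ := he
            have : 2 ∣ i := Dvd.dvd.trans ⟨k, by omega⟩ hdvd
            omega
          · exact Nat.odd_iff.mp ho
        have hmem : (m:Int) ∈ PySem.List.pyRange 3 ((i.sqrt:Int) + 1) 2 := by
          rw [PySem.List.mem_pyRange_iff_of_pos (by norm_num)]
          refine ⟨by exact_mod_cast (by omega : 3 ≤ m), by omega, by omega⟩
        exact hall _ hmem ((PySem.Int.mod_eq_zero_iff_dvd _ _).mpr (Int.natCast_dvd_natCast.mpr hdvd))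
      · intro hp x hxmem hmod
        rw [PySem.List.mem_pyRange_iff_of_pos (by norm_num)] at hxmem
        obtain ⟨h3x, hxs, _⟩ := hxmem
        have hdvd : x ∣ (i:Int) := (PySem.Int.mod_eq_zero_iff_dvd _ _).mp hmod
        obtain ⟨m, rfl⟩ : ∃ m : Nat, x = (m:Int) := ⟨x.toNat, by omega⟩
        have hmd : m ∣ i := by exact_mod_cast hdvd
        have hms : m ≤ i.sqrt := by omega
        have hsl : i.sqrt < i := Nat.sqrt_lt_self (by omega)
        rcases hp.eq_one_or_self_of_dvd m hmd with h | h <;> omega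

-- smallest prime ≥ i (termination measure helper for the while loops)
def nextP (i : Nat) : Nat := Nat.find (Nat.exists_infinite_primes i)

theorem nextP_step {i : Nat} (h : ¬ Nat.Prime i) :
    nextP (i + 1) - (i + 1) < nextP i - i := by
  have h1 : i ≤ nextP i ∧ (nextP i).Prime := Nat.find_spec (Nat.exists_infinite_primes i)
  have hne : nextP i ≠ i := fun he => h (he ▸ h1.2)
  have h2 : nextP (i + 1) ≤ nextP i := Nat.find_min' _ ⟨by omega, h1.2⟩
  omega

-- the while loop of A: state (prime_sum, prime_count, i)
def loopA (n : Nat) (prime_sum : Int) (prime_count i : Nat) : Int :=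
  if _h : prime_count < n then
    if hp : is_prime (i : Int) = true then
      loopA n (prime_sum + (Nat.factorial i : Int)) (prime_count + 1) (i + 1)
    else
      loopA n prime_sum prime_count (i + 1)
  else prime_sum
termination_by (n - prime_count, nextP i - i)
decreasing_by
  · exact Prod.Lex.left _ _ (by omega)
  · exact Prod.Lex.right _ (nextP_step (fun hpr => hp ((is_prime_iff i).mpr hpr)))

-- n ≤ 0 makes the Python while loop run zero times; the counters are nonnegative ints.
def prime_factorial_sum (n : Int) : Int := loopA n.toNat 0 0 2

-- ===== PORT B =====
-- _is_prime: i >= 2 and all(i % d for d in range(2, isqrt(i)+1))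
def isPrimeB (i : Int) : Bool :=
  decide (2 ≤ i) &&
    (PySem.List.pyRange 2 ((i.toNat.sqrt : Int) + 1) 1).all
      (fun d => !(PySem.Int.mod i d = 0))

theorem isPrimeB_iff (i : Nat) : isPrimeB (i : Int) = true ↔ Nat.Prime i := by
  unfold isPrimeB
  rw [Bool.and_eq_true, decide_eq_true_iff, List.all_eq_true, Nat.prime_def_le_sqrt]
  simp only [Int.toNat_natCast]
  constructor
  · rintro ⟨h2, hall⟩
    refine ⟨by exact_mod_cast h2, fun m hm2 hms hdvd => ?_⟩
    have hmem : (m:Int) ∈ PySem.List.pyRange 2 ((i.sqrt:Int)+1) 1 := by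
      rw [PySem.List.mem_pyRange_one]
      exact ⟨by exact_mod_cast hm2, by omega⟩
    have hx := hall _ hmem
    simp only [Bool.not_eq_true', decide_eq_false_iff_not] at hx
    exact hx ((PySem.Int.mod_eq_zero_iff_dvd _ _).mpr (Int.natCast_dvd_natCast.mpr hdvd))
  · rintro ⟨h2, hnd⟩
    refine ⟨by exact_mod_cast h2, fun x hx => ?_⟩
    rw [PySem.List.mem_pyRange_one] at hx
    simp only [Bool.not_eq_true', decide_eq_false_iff_not]
    intro hmod
    have hdvd : x ∣ (i:Int) := (PySem.Int.mod_eq_zero_iff_dvd _ _).mp hmod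
    obtain ⟨m, rfl⟩ : ∃ m : Nat, x = (m:Int) := ⟨x.toNat, by omega⟩
    have hms : m ≤ i.sqrt := by have := hx.2; omega
    exact hnd m (by exact_mod_cast hx.1) hms (Int.natCast_dvd_natCast.mp hdvd)

-- the while loop of B: state (total, count, fact, i); fact *= i first, add on primes
def loopB (n : Nat) (total : Int) (count : Nat) (fact : Int) (i : Nat) : Int :=
  if _h : count < n then
    if hp : isPrimeB (i : Int) = true then
      loopB n (total + fact * (i : Int)) (count + 1) (fact * (i : Int)) (i + 1)
    else
      loopB n total count (fact * (i : Int)) (i + 1)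
  else total
termination_by (n - count, nextP i - i)
decreasing_by
  · exact Prod.Lex.left _ _ (by omega)
  · exact Prod.Lex.right _ (nextP_step (fun hpr => hp ((isPrimeB_iff i).mpr hpr)))

def prime_factorial_sum_alt (n : Int) : Int := loopB n.toNat 0 0 1 2

-- ===== PRECONDITION & SPEC =====
def Spec_prime_factorial_sum (n : Int) (out : Int) : Prop := out = prime_factorial_sum_alt n
instance (n : Int) (out : Int) : Decidable (Spec_prime_factorial_sum n out) := by unfold Spec_prime_factorial_sum; infer_instance

-- ===== CLAIM (what is proved, stated in full; the proofs are below) =====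
def Claim_equal_prime_factorial_sum : Prop := ∀ (n : Int), Dom_prime_factorial_sum n → Spec_prime_factorial_sum n (prime_factorial_sum n)

-- ===== LEMMAS AND PROOFS =====

theorem tests_eq (i : Nat) : is_prime (i : Int) = isPrimeB (i : Int) := by
  by_cases h : Nat.Prime i
  · rw [(is_prime_iff i).mpr h, (isPrimeB_iff i).mpr h]
  · rw [Bool.eq_false_iff.mpr (fun hc => h ((is_prime_iff i).mp hc)),
        Bool.eq_false_iff.mpr (fun hc => h ((isPrimeB_iff i).mp hc))]

theorem loop_eq (n prime_count i : Nat) (prime_sum : Int) :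
    1 ≤ i →
    loopA n prime_sum prime_count i
      = loopB n prime_sum prime_count ((Nat.factorial (i - 1) : Nat) : Int) i := by
  induction prime_sum, prime_count, i using loopA.induct n with
  | case1 s c i h hp ih =>
    intro hi
    rw [loopA, loopB]
    have hf : ((i - 1).factorial : Int) * (i : Int) = (i.factorial : Int) := by
      have : i = (i - 1) + 1 := by omega
      rw [this, Nat.factorial_succ]
      push_cast
      ring
    simp only [dif_pos h, ← tests_eq, dif_pos hp, hf]
    have := ih (by omega)
    simpa using this
  | case2 s c i h hp ih =>
    intro hi
    rw [loopA, loopB]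
    have hf : ((i - 1).factorial : Int) * (i : Int) = (i.factorial : Int) := by
      have : i = (i - 1) + 1 := by omega
      rw [this, Nat.factorial_succ]
      push_cast
      ring
    simp only [dif_pos h, ← tests_eq, dif_neg hp, hf]
    exact ih (by omega)
  | case3 s c i h =>
    intro _
    rw [loopA, loopB]
    simp [h]

-- ===== VERDICT (by name: the statement is the Claim_ definition above) =====
theorem prime_factorial_sum_spec : Claim_equal_prime_factorial_sum := by
  intro n _
  unfold Spec_prime_factorial_sum prime_factorial_sum prime_factorial_sum_alt
  simpa using loop_eq n.toNat 0 2 0 (by omega)
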